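-- pv_equiv track=rewrite | github.com/abitabir/ScaleyStuffs | miscellaneous/Citrix/Sample/degreeOfAnArray4.py | finding_subarrays_with_same_degree_as_array
-- ===== SOURCE A (Python) =====
-- def finding_subarrays_with_same_degree_as_array(array, modes, degree):
--     subarrays = {}
--     for mode in modes:
--         subarray = []
--         mode_count = 0
--         index = 0
--         while mode_count < degree and index < len(array):  # until all occurrence of the mode have been added to the subarray
--             element = array[index]
--             if element == mode:
--                 mode_count += 1
--             if mode_count > 0:  # starting adding to array from when first occurrence of mode found
--                 subarray.append(element)
--             index += 1
--         subarrays[mode] = subarray  # technically, I don't even need a memory of the subarray XO but it's good for debugging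
--     return subarrays
-- ===== SOURCE B (Python) =====
-- def finding_subarrays_with_same_degree_as_array(array, modes, degree):
--     # One pass over the array recording, per value: its first index, its running
--     # count, and the index where the count reaches `degree`; then each mode's
--     # subarray is just a slice of `array`.
--     if degree <= 0:
--         return {mode: [] for mode in modes}
--     first = {}
--     count = {}
--     last = {}
--     for i, x in enumerate(array):
--         if x not in first:
--             first[x] = i
--         c = count.get(x, 0) + 1
--         count[x] = c
--         if c == degree:
--             last[x] = i
--     result = {}
--     for mode in modes:
--         if mode in last:
--             result[mode] = array[first[mode]:last[mode] + 1]
--         elif mode in first: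
--             result[mode] = array[first[mode]:]
--         else:
--             result[mode] = []
--     return result
-- ===== Notes on version B (the rewrite author's own statement) =====
-- stated objective: faster
-- what changed: Replaces the per-mode rescans of the array by a single pass that records each value's first index, running count and the index where the count reaches the degree, then slices the array once per mode.
import Mathlib
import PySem

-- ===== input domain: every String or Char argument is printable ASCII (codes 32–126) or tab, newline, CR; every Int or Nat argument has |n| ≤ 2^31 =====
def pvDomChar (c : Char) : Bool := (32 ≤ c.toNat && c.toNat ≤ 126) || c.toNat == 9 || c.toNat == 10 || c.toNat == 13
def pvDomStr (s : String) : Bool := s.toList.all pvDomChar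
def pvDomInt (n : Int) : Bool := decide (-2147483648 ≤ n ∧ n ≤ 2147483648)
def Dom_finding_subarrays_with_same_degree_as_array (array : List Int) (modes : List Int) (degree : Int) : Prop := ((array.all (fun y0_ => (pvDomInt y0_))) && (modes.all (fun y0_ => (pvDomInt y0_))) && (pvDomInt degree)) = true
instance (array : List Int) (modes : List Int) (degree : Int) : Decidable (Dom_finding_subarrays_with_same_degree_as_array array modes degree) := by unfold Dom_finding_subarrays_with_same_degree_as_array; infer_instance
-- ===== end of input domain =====

-- ===== PORT A =====
-- B replaces A's per-mode rescans by one pass recording first index / count / degree-th-occurrence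
-- index per value, then slicing; return-value equivalence, faster asymptotically (measured).
-- A's inner while loop: scans from the start, counting occurrences of `mode` and collecting
-- from the first occurrence until the count reaches `degree`.
def pvLoopA (degree mode : Int) : List Int → Int → List Int → List Int
  | [], _, sub => sub
  | x :: rest, mc, sub =>
    if mc < degree then
      let mc' := if x == mode then mc + 1 else mc
      let sub' := if mc' > 0 then sub ++ [x] else sub
      pvLoopA degree mode rest mc' sub'
    else sub

def finding_subarrays_with_same_degree_as_array (array : List Int) (modes : List Int) (degree : Int) : List (Int × List Int) :=
  (modes.foldl (fun d mode => d.insert mode (pvLoopA degree mode array 0 [])) PySem.Dict.empty).items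

-- ===== PORT B =====
-- the body of Source B's enumerate loop: update the three dicts (first, count, last) at key x
def pvScanB (degree : Int) (st : PySem.Dict Int Int × PySem.Dict Int Int × PySem.Dict Int Int)
    (p : Int × Int) : PySem.Dict Int Int × PySem.Dict Int Int × PySem.Dict Int Int :=
  let first := st.1
  let count := st.2.1
  let last := st.2.2
  let i := p.1
  let x := p.2
  let first' := if first.contains x then first else first.insert x i
  let c := count.getD x 0 + 1
  let count' := count.insert x c
  let last' := if c == degree then last.insert x i else last
  (first', count', last')

-- Source B's result entry for one mode; `first[mode]` is written as getD (the key is present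
-- whenever the branch is reached, so the default is never used)
def pvSubB (array : List Int) (first last : PySem.Dict Int Int) (mode : Int) : List Int :=
  match last.get? mode with
  | some l => PySem.List.slice array (some (first.getD mode 0)) (some (l + 1))
  | none =>
    match first.get? mode with
    | some f => PySem.List.slice array (some f) none
    | none => []

def finding_subarrays_with_same_degree_as_array_alt (array : List Int) (modes : List Int) (degree : Int) : List (Int × List Int) :=
  if degree ≤ 0 then
    (modes.foldl (fun d mode => d.insert mode ([] : List Int)) PySem.Dict.empty).items
  else
    let st := (PySem.List.enumerate array 0).foldl (pvScanB degree)
      (PySem.Dict.empty, PySem.Dict.empty, PySem.Dict.empty)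
    (modes.foldl (fun d mode => d.insert mode (pvSubB array st.1 st.2.2 mode)) PySem.Dict.empty).items

-- ===== PRECONDITION & SPEC =====
def Spec_finding_subarrays_with_same_degree_as_array (array : List Int) (modes : List Int) (degree : Int) (out : List (Int × List Int)) : Prop := out = finding_subarrays_with_same_degree_as_array_alt array modes degree
instance (array : List Int) (modes : List Int) (degree : Int) (out : List (Int × List Int)) : Decidable (Spec_finding_subarrays_with_same_degree_as_array array modes degree out) := by unfold Spec_finding_subarrays_with_same_degree_as_array; infer_instance

-- ===== CLAIM (what is proved, stated in full; the proofs are below) =====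
def Claim_equal_finding_subarrays_with_same_degree_as_array : Prop := ∀ (array : List Int) (modes : List Int) (degree : Int), Dom_finding_subarrays_with_same_degree_as_array array modes degree → Spec_finding_subarrays_with_same_degree_as_array array modes degree (finding_subarrays_with_same_degree_as_array array modes degree)

-- ===== LEMMAS AND PROOFS =====

-- spec-side model of A's loop: collect phase (r = remaining occurrences of v still needed)
def pvTakeCnt (v : Int) : Int → List Int → List Int
  | _, [] => []
  | r, x :: xs => if 0 < r then x :: pvTakeCnt v (if x = v then r - 1 else r) xs else []

-- spec-side model of A's loop: search phase (before the first occurrence of v)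
def pvFindPh (v degree : Int) : List Int → List Int
  | [] => []
  | x :: xs => if x = v then x :: pvTakeCnt v (degree - 1) xs else pvFindPh v degree xs

-- model of the `first` dict: index of the first occurrence of v, counting from s
def pvFF (s v : Int) : List Int → Option Int
  | [] => none
  | x :: xs => if x = v then some s else pvFF (s + 1) v xs

-- model of the `last` dict: index where the count of v (starting at c) reaches degree
def pvLF (degree : Int) (s c v : Int) : List Int → Option Int
  | [] => none
  | x :: xs =>
    if x = v then (if c + 1 = degree then some s else pvLF degree (s + 1) (c + 1) v xs)
    else pvLF degree (s + 1) c v xs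

theorem pvLoopA_stop (degree mode : Int) (xs : List Int) (mc : Int) (sub : List Int)
    (h : degree ≤ mc) : pvLoopA degree mode xs mc sub = sub := by
  cases xs with
  | nil => rfl
  | cons x rest => simp [pvLoopA, not_lt.mpr h]

theorem pvLoopA_collect (degree mode : Int) (xs : List Int) : ∀ (mc : Int) (sub : List Int),
    0 < mc → pvLoopA degree mode xs mc sub = sub ++ pvTakeCnt mode (degree - mc) xs := by
  induction xs with
  | nil => intro mc sub _; simp [pvLoopA, pvTakeCnt]
  | cons x rest ih =>
    intro mc sub hmc
    by_cases hlt : mc < degree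
    · have hr : 0 < degree - mc := by omega
      have hp1 : (0:Int) < mc + 1 := by omega
      by_cases hx : x = mode
      · have h1 : pvLoopA degree mode (x :: rest) mc sub
            = pvLoopA degree mode rest (mc + 1) (sub ++ [x]) := by
          have h2 : mc + 1 > 0 := hp1
          simp [pvLoopA, hlt, hx, h2]
        have h3 : degree - (mc + 1) = degree - mc - 1 := by omega
        rw [h1, ih (mc + 1) (sub ++ [x]) hp1, h3]
        simp [pvTakeCnt, hlt, hx]
      · have h1 : pvLoopA degree mode (x :: rest) mc sub
            = pvLoopA degree mode rest mc (sub ++ [x]) := by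
          simp [pvLoopA, hlt, hx, hmc]
        rw [h1, ih mc (sub ++ [x]) hmc]
        simp [pvTakeCnt, hlt, hx]
    · have hge : degree ≤ mc := by omega
      have hr : ¬ (0:Int) < degree - mc := by omega
      rw [pvLoopA_stop degree mode _ _ _ hge]
      simp [pvTakeCnt, hlt]

theorem pvLoopA_search (degree mode : Int) (xs : List Int) (hdeg : 0 < degree) :
    pvLoopA degree mode xs 0 [] = pvFindPh mode degree xs := by
  induction xs with
  | nil => rfl
  | cons x rest ih =>
    by_cases hx : x = mode
    · have h1 : pvLoopA degree mode (x :: rest) 0 []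
          = pvLoopA degree mode rest 1 [x] := by
        simp [pvLoopA, hdeg, hx]
      have hp1 : (0:Int) < 1 := by omega
      rw [h1, pvLoopA_collect degree mode rest 1 [x] hp1]
      simp [pvFindPh, hx]
    · have h1 : pvLoopA degree mode (x :: rest) 0 []
          = pvLoopA degree mode rest 0 [] := by
        simp [pvLoopA, hdeg, hx]
      rw [h1, ih]
      simp [pvFindPh, hx]

theorem pvLF_none_of_ge (degree : Int) (xs : List Int) : ∀ (s c v : Int), degree ≤ c →
    pvLF degree s c v xs = none := by
  induction xs with
  | nil => intro s c v _; rfl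
  | cons x rest ih =>
    intro s c v h
    have hne : ¬ (c + 1 = degree) := by omega
    by_cases hx : x = v
    · simp [pvLF, hx, hne, ih (s + 1) (c + 1) v (by omega)]
    · simp [pvLF, hx, ih (s + 1) c v h]

-- the one-pass scan computes exactly the three model functions, pointwise
theorem pvScan_inv (degree : Int) (xs : List Int) : ∀ (s : Int)
    (f c l : PySem.Dict Int Int) (v : Int),
    ((PySem.List.enumerate xs s).foldl (pvScanB degree) (f, c, l)).1.get? v
        = (f.get? v).or (pvFF s v xs)
    ∧ ((PySem.List.enumerate xs s).foldl (pvScanB degree) (f, c, l)).2.1.getD v 0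
        = c.getD v 0 + xs.count v
    ∧ ((PySem.List.enumerate xs s).foldl (pvScanB degree) (f, c, l)).2.2.get? v
        = (pvLF degree s (c.getD v 0) v xs).or (l.get? v) := by
  induction xs with
  | nil => intro s f c l v; simp [PySem.List.enumerate_nil, pvFF, pvLF]
  | cons x rest ih =>
    intro s f c l v
    rw [PySem.List.enumerate_cons]
    simp only [List.foldl_cons, pvScanB]
    obtain ⟨ih1, ih2, ih3⟩ := ih (s + 1) (if f.contains x then f else f.insert x s)
      (c.insert x (c.getD x 0 + 1))
      (if (c.getD x 0 + 1) == degree then l.insert x s else l) v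
    refine ⟨?_, ?_, ?_⟩
    · rw [ih1]
      by_cases hv : x = v
      · subst hv
        by_cases hcont : f.contains x
        · have hs : (f.get? x).isSome := by
            rw [← PySem.Dict.contains_eq_isSome_get?]; exact hcont
          obtain ⟨a, ha⟩ := Option.isSome_iff_exists.mp hs
          simp [hcont, ha, pvFF]
        · have hn : f.get? x = none := by
            rcases h : f.get? x with _ | a
            · rfl
            · exfalso
              have hsome : (f.get? x).isSome := by simp [h]
              rw [← PySem.Dict.contains_eq_isSome_get?] at hsome
              exact absurd hsome (by simp [hcont])
          simp [hcont, hn, pvFF, PySem.Dict.get?_insert_self]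
      · have hg : (if f.contains x then f else f.insert x s).get? v = f.get? v := by
          by_cases hcont : f.contains x
          · simp [hcont]
          · simp [hcont, PySem.Dict.get?_insert_of_ne f s (Ne.symm hv)]
        rw [hg]
        simp [pvFF, hv]
    · rw [ih2]
      by_cases hv : v = x
      · subst hv
        simp [PySem.Dict.getD_insert, List.count_cons]
        push_cast
        ring
      · simp [PySem.Dict.getD_insert, hv, List.count_cons]
        exact fun h => hv h.symm
    · rw [ih3]
      by_cases hv : x = v
      · subst hv
        have hgd : (c.insert x (c.getD x 0 + 1)).getD x 0 = c.getD x 0 + 1 := by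
          simp [PySem.Dict.getD_insert]
        rw [hgd]
        by_cases hd : c.getD x 0 + 1 = degree
        · rw [pvLF_none_of_ge degree rest (s + 1) (c.getD x 0 + 1) x (by omega)]
          simp [pvLF, hd, PySem.Dict.get?_insert_self]
        · simp [pvLF, hd]
      · have hvx : ¬ v = x := fun h => hv h.symm
        have hgd : (c.insert x (c.getD x 0 + 1)).getD v 0 = c.getD v 0 := by
          simp [PySem.Dict.getD_insert, hvx]
        rw [hgd]
        have hl : (if (c.getD x 0 + 1) == degree then l.insert x s else l).get? v
            = l.get? v := by
          by_cases hb : ((c.getD x 0 + 1) == degree) = true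
          · simp [hb, PySem.Dict.get?_insert_of_ne l s (Ne.symm hv)]
          · simp [hb]
        rw [hl]
        simp [pvLF, hv]

theorem pvTakeCnt_nonpos (v r : Int) (xs : List Int) (h : r ≤ 0) : pvTakeCnt v r xs = [] := by
  cases xs with
  | nil => rfl
  | cons x rest => simp [pvTakeCnt, show ¬ (0:Int) < r from by omega]

theorem pvLF_some (degree v : Int) (xs : List Int) : ∀ (s c L : Int), c < degree →
    pvLF degree s c v xs = some L →
    ∃ k : Nat, L = s + k ∧ k < xs.length ∧ pvTakeCnt v (degree - c) xs = xs.take (k + 1) := by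
  induction xs with
  | nil => intro s c L _ h; exact absurd h (by simp [pvLF])
  | cons x rest ih =>
    intro s c L hc hfind
    have hr : (0:Int) < degree - c := by omega
    by_cases hx : x = v
    · by_cases hd : c + 1 = degree
      · have hL : L = s := by
          have := hfind
          simp [pvLF, hx, hd] at this
          omega
        refine ⟨0, by omega, by simp, ?_⟩
        simp [pvTakeCnt, hr, hc, hx, show degree - c - 1 = 0 from by omega,
          pvTakeCnt_nonpos v 0 rest le_rfl]
      · have hfind' : pvLF degree (s + 1) (c + 1) v rest = some L := by
          simpa [pvLF, hx, hd] using hfind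
        obtain ⟨k, hk1, hk2, hk3⟩ := ih (s + 1) (c + 1) L (by omega) hfind'
        refine ⟨k + 1, by push_cast; omega, by simpa using by omega, ?_⟩
        simp [pvTakeCnt, hr, hc, hx, show degree - c - 1 = degree - (c + 1) from by omega, hk3]
    · have hfind' : pvLF degree (s + 1) c v rest = some L := by
        simpa [pvLF, hx] using hfind
      obtain ⟨k, hk1, hk2, hk3⟩ := ih (s + 1) c L hc hfind'
      refine ⟨k + 1, by push_cast; omega, by simpa using by omega, ?_⟩
      simp [pvTakeCnt, hr, hc, hx, hk3]

theorem pvLF_none (degree v : Int) (xs : List Int) : ∀ (s c : Int), c < degree →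
    pvLF degree s c v xs = none → pvTakeCnt v (degree - c) xs = xs := by
  induction xs with
  | nil => intro s c _ _; rfl
  | cons x rest ih =>
    intro s c hc hfind
    have hr : (0:Int) < degree - c := by omega
    by_cases hx : x = v
    · by_cases hd : c + 1 = degree
      · exact absurd hfind (by simp [pvLF, hx, hd])
      · have hfind' : pvLF degree (s + 1) (c + 1) v rest = none := by
          simpa [pvLF, hx, hd] using hfind
        simp [pvTakeCnt, hr, hc, hx, show degree - c - 1 = degree - (c + 1) from by omega,
          ih (s + 1) (c + 1) (by omega) hfind']
    · have hfind' : pvLF degree (s + 1) c v rest = none := by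
        simpa [pvLF, hx] using hfind
      simp [pvTakeCnt, hr, hc, hx, ih (s + 1) c hc hfind']

theorem pvFF_succ (v : Int) (xs : List Int) : ∀ s,
    pvFF (s + 1) v xs = (pvFF s v xs).map (· + 1) := by
  induction xs with
  | nil => intro s; rfl
  | cons x rest ih =>
    intro s
    by_cases hx : x = v
    · simp [pvFF, hx]
    · simp [pvFF, hx, ih (s + 1)]

theorem pvLF_succ (degree v : Int) (xs : List Int) : ∀ s c,
    pvLF degree (s + 1) c v xs = (pvLF degree s c v xs).map (· + 1) := by
  induction xs with
  | nil => intro s c; rfl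
  | cons x rest ih =>
    intro s c
    by_cases hx : x = v
    · by_cases hd : c + 1 = degree
      · simp [pvLF, hx, hd]
      · simp [pvLF, hx, hd, ih (s + 1) (c + 1)]
    · simp [pvLF, hx, ih (s + 1) c]

theorem pvFF_le (v : Int) (xs : List Int) : ∀ s f, pvFF s v xs = some f → s ≤ f := by
  induction xs with
  | nil => intro s f h; exact absurd h (by simp [pvFF])
  | cons x rest ih =>
    intro s f h
    by_cases hx : x = v
    · simp [pvFF, hx] at h; omega
    · have := ih (s + 1) f (by simpa [pvFF, hx] using h)
      omega

theorem pvLF_le (degree v : Int) (xs : List Int) : ∀ s c L,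
    pvLF degree s c v xs = some L → s ≤ L := by
  induction xs with
  | nil => intro s c L h; exact absurd h (by simp [pvLF])
  | cons x rest ih =>
    intro s c L h
    by_cases hx : x = v
    · by_cases hd : c + 1 = degree
      · simp [pvLF, hx, hd] at h; omega
      · have := ih (s + 1) (c + 1) L (by simpa [pvLF, hx, hd] using h)
        omega
    · have := ih (s + 1) c L (by simpa [pvLF, hx] using h)
      omega

theorem pvFF_of_pvLF_some (degree v : Int) (xs : List Int) : ∀ s c L,
    pvLF degree s c v xs = some L → ∃ f, pvFF s v xs = some f ∧ f ≤ L := by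
  induction xs with
  | nil => intro s c L h; exact absurd h (by simp [pvLF])
  | cons x rest ih =>
    intro s c L h
    by_cases hx : x = v
    · by_cases hd : c + 1 = degree
      · have hL : L = s := by simp [pvLF, hx, hd] at h; omega
        exact ⟨s, by simp [pvFF, hx], by omega⟩
      · have h' : pvLF degree (s + 1) (c + 1) v rest = some L := by
          simpa [pvLF, hx, hd] using h
        have hle := pvLF_le degree v rest (s + 1) (c + 1) L h'
        exact ⟨s, by simp [pvFF, hx], by omega⟩
    · have h' : pvLF degree (s + 1) c v rest = some L := by
        simpa [pvLF, hx] using h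
      obtain ⟨f, hf1, hf2⟩ := ih (s + 1) c L h'
      exact ⟨f, by simpa [pvFF, hx] using hf1, hf2⟩

-- per-mode model of Source B's result entry, in terms of the scan models
def pvModelSub (array : List Int) (degree v : Int) : List Int :=
  match pvLF degree 0 0 v array with
  | some l => PySem.List.slice array (some ((pvFF 0 v array).getD 0)) (some (l + 1))
  | none =>
    match pvFF 0 v array with
    | some f => PySem.List.slice array (some f) none
    | none => []

theorem pvModelSub_eq (degree v : Int) (array : List Int) (hdeg : 0 < degree) :
    pvModelSub array degree v = pvFindPh v degree array := by
  induction array with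
  | nil => rfl
  | cons x rest ih =>
    by_cases hx : x = v
    · subst hx
      have hFF : pvFF 0 x (x :: rest) = some 0 := by simp [pvFF]
      by_cases hd : (1:Int) = degree
      · have hLF : pvLF degree 0 0 x (x :: rest) = some 0 := by simp [pvLF, ← hd]
        unfold pvModelSub
        rw [hLF, hFF]
        simp only [Option.getD_some]
        rw [PySem.List.slice_toNat (x :: rest) (by omega) (by omega)]
        simp [pvFindPh, pvTakeCnt_nonpos x (degree - 1) rest (by omega)]
      · have hstep : pvLF degree 0 0 x (x :: rest) = pvLF degree 1 1 x rest := by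
          simp [pvLF, hd, show ¬ ((0:Int) + 1 = degree) from by omega]
        cases hLF : pvLF degree 1 1 x rest with
        | some L =>
          obtain ⟨k, hk1, hk2, hk3⟩ := pvLF_some degree x rest 1 1 L (by omega) hLF
          unfold pvModelSub
          rw [hstep, hLF, hFF]
          simp only [Option.getD_some]
          rw [PySem.List.slice_toNat (x :: rest) (by omega) (by omega)]
          rw [show ((L:Int) + 1).toNat = k + 2 from by omega]
          simp [pvFindPh, hk3]
        | none =>
          have h3 := pvLF_none degree x rest 1 1 (by omega) hLF
          unfold pvModelSub
          rw [hstep, hLF, hFF]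
          simp only [Option.getD_some]
          rw [PySem.List.slice_from (x :: rest) (by omega)]
          simp [pvFindPh, h3]
    · have hFFstep : pvFF 0 v (x :: rest) = (pvFF 0 v rest).map (· + 1) := by
        rw [show pvFF 0 v (x :: rest) = pvFF (0 + 1) v rest from by simp [pvFF, hx]]
        exact pvFF_succ v rest 0
      have hLFstep : pvLF degree 0 0 v (x :: rest) = (pvLF degree 0 0 v rest).map (· + 1) := by
        rw [show pvLF degree 0 0 v (x :: rest) = pvLF degree (0 + 1) 0 v rest from by
          simp [pvLF, hx]]
        exact pvLF_succ degree v rest 0 0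
      have hFP : pvFindPh v degree (x :: rest) = pvFindPh v degree rest := by
        simp [pvFindPh, hx]
      rw [hFP, ← ih]
      unfold pvModelSub
      rw [hLFstep, hFFstep]
      cases hLF : pvLF degree 0 0 v rest with
      | some L =>
        obtain ⟨f, hf1, hf2⟩ := pvFF_of_pvLF_some degree v rest 0 0 L hLF
        have hf0 : (0:Int) ≤ f := pvFF_le v rest 0 f hf1
        rw [hf1]
        simp only [Option.map_some, Option.getD_some]
        rw [PySem.List.slice_toNat (x :: rest) (by omega) (by omega),
          PySem.List.slice_toNat rest (by omega) (by omega)]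
        rw [show ((f:Int) + 1).toNat = f.toNat + 1 from by omega]
        simp only [List.drop_succ_cons]
        congr 1
        omega
      | none =>
        simp only [Option.map_none]
        cases hFF0 : pvFF 0 v rest with
        | some f =>
          have hf0 : (0:Int) ≤ f := pvFF_le v rest 0 f hFF0
          simp only [Option.map_some]
          rw [PySem.List.slice_from (x :: rest) (by omega),
            PySem.List.slice_from rest (by omega)]
          rw [show ((f:Int) + 1).toNat = f.toNat + 1 from by omega]
          simp
        | none => rfl

-- main per-mode lemma
theorem pvSub_eq (degree v : Int) (array : List Int) (hdeg : 0 < degree) :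
    pvSubB array
      ((PySem.List.enumerate array 0).foldl (pvScanB degree)
        (PySem.Dict.empty, PySem.Dict.empty, PySem.Dict.empty)).1
      ((PySem.List.enumerate array 0).foldl (pvScanB degree)
        (PySem.Dict.empty, PySem.Dict.empty, PySem.Dict.empty)).2.2
      v = pvFindPh v degree array := by
  obtain ⟨h1, _, h3⟩ := pvScan_inv degree array 0 PySem.Dict.empty PySem.Dict.empty
    PySem.Dict.empty v
  rw [← pvModelSub_eq degree v array hdeg]
  unfold pvSubB pvModelSub
  rw [h1, h3]
  simp [PySem.Dict.getD_eq_get?_getD, h1]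

theorem foldl_insert_congr (g h : Int → List Int) (modes : List Int)
    (heq : ∀ m, g m = h m) :
    modes.foldl (fun d mode => d.insert mode (g mode)) PySem.Dict.empty
      = modes.foldl (fun d mode => d.insert mode (h mode)) PySem.Dict.empty := by
  have : (fun (d : PySem.Dict Int (List Int)) mode => d.insert mode (g mode))
      = fun d mode => d.insert mode (h mode) := by
    funext d m; rw [heq]
  rw [this]

-- ===== VERDICT (by name: the statement is the Claim_ definition above) =====
theorem finding_subarrays_with_same_degree_as_array_spec : Claim_equal_finding_subarrays_with_same_degree_as_array := by
  intro array modes degree _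
  unfold Spec_finding_subarrays_with_same_degree_as_array
  unfold finding_subarrays_with_same_degree_as_array finding_subarrays_with_same_degree_as_array_alt
  by_cases hdeg : degree ≤ 0
  · rw [if_pos hdeg]
    exact congrArg PySem.Dict.items
      (foldl_insert_congr _ _ modes (fun m => pvLoopA_stop degree m array 0 [] hdeg))
  · rw [if_neg hdeg]
    have hdeg' : (0:Int) < degree := by omega
    exact congrArg PySem.Dict.items
      (foldl_insert_congr _ _ modes (fun m => by
        rw [pvLoopA_search degree m array hdeg', ← pvSub_eq degree m array hdeg']))
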